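-- pv_equiv track=rewrite | github.com/mae04038/Algorithm_HJ | BOJ/SWEA/2022/꼬리잡기놀이.py | step3_get_score
-- ===== SOURCE A (Python) =====
-- def step3_get_score(ball_path, teams):
--     for path in ball_path: # 공 던져지는 경로 순
--         for n in range(len(teams)):
--             for idx, pos in enumerate(teams[n]):
--                 if tuple(pos) == path: # 공 던져지는 위치 순이므로 자동으로 가장 먼저 맞은 사람
--                     teams[n] = teams[n][::-1] # 머리사람 꼬리사람 위치 바뀜
--                     return (idx+1)*(idx+1) # 사람 만나면 끝, 리턴
--     return 0
-- ===== SOURCE B (Python) =====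
-- def step3_get_score(ball_path, teams):
--     pos_map = {}
--     for n, team in enumerate(teams):
--         for idx, pos in enumerate(team):
--             pos_map.setdefault(tuple(pos), (n, idx))
--     for path in ball_path:
--         hit = pos_map.get(path)
--         if hit is not None:
--             n, idx = hit
--             teams[n] = teams[n][::-1]
--             return (idx + 1) * (idx + 1)
--     return 0
-- ===== Notes on version B (the rewrite author's own statement) =====
-- stated objective: faster
-- what changed: B builds a position->(team,index) dict once (setdefault keeps the first occurrence, matching A's scan order) and then walks ball_path with O(1) lookups, instead of A's rescan of every team member for every path cell.
import Mathlib
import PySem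

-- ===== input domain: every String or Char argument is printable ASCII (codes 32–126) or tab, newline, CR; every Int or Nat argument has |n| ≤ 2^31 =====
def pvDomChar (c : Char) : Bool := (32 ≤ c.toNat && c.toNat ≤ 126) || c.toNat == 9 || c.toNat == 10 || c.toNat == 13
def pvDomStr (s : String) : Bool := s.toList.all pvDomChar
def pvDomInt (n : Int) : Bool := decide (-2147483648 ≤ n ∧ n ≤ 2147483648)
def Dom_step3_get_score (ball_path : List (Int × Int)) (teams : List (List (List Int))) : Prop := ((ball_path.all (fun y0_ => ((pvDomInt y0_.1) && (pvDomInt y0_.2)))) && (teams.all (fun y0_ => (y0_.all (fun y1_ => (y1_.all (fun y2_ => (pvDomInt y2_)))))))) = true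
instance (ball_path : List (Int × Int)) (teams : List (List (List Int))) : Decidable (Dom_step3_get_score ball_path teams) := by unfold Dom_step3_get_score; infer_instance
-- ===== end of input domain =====

-- B replaces A's per-cell rescan of all teams by one position→(team,index) dict built up front;
-- return values agree everywhere. Both Pythons also reverse the hit team in place (same side effect);
-- the theorems below are about the return value only.

-- ===== PORT A =====
-- inner 'for idx, pos in enumerate(teams[n]): if tuple(pos) == path: …' (i is the running idx)
def pvA_findIdx (key : List Int) (team : List (List Int)) (i : Int) : Option Int :=
  match team with
  | [] => none
  | pos :: rest => if pos = key then some i else pvA_findIdx key rest (i + 1)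

-- middle 'for n in range(len(teams)): …' scanning teams in order
def pvA_scanTeams (key : List Int) (ts : List (List (List Int))) : Option Int :=
  match ts with
  | [] => none
  | t :: rest =>
    match pvA_findIdx key t 0 with
    | some i => some i
    | none => pvA_scanTeams key rest

def step3_get_score (ball_path : List (Int × Int)) (teams : List (List (List Int))) : Int :=
  match ball_path with
  | [] => 0
  | p :: rest =>
    match pvA_scanTeams [p.1, p.2] teams with
    | some i => (i + 1) * (i + 1)
    | none => step3_get_score rest teams

-- ===== PORT B =====
-- 'for n, team in enumerate(teams): for idx, pos in enumerate(team): pos_map.setdefault(tuple(pos), (n, idx))'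
def pvB_build (teams : List (List (List Int))) : PySem.Dict (List Int) (Int × Int) :=
  (PySem.List.enumerate teams 0).foldl
    (fun d tp => (PySem.List.enumerate tp.2 0).foldl
      (fun d q => d.setdefault q.2 (tp.1, q.1)) d)
    PySem.Dict.empty

-- 'for path in ball_path: hit = pos_map.get(path); if hit is not None: return (idx+1)*(idx+1)'
def pvB_loop (d : PySem.Dict (List Int) (Int × Int)) (ball_path : List (Int × Int)) : Int :=
  match ball_path with
  | [] => 0
  | p :: rest =>
    match d.get? [p.1, p.2] with
    | some q => (q.2 + 1) * (q.2 + 1)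
    | none => pvB_loop d rest

def step3_get_score_alt (ball_path : List (Int × Int)) (teams : List (List (List Int))) : Int :=
  pvB_loop (pvB_build teams) ball_path

-- ===== PRECONDITION & SPEC =====
def Spec_step3_get_score (ball_path : List (Int × Int)) (teams : List (List (List Int))) (out : Int) : Prop := out = step3_get_score_alt ball_path teams
instance (ball_path : List (Int × Int)) (teams : List (List (List Int))) (out : Int) : Decidable (Spec_step3_get_score ball_path teams out) := by unfold Spec_step3_get_score; infer_instance

-- ===== CLAIM (what is proved, stated in full; the proofs are below) =====
def Claim_equal_step3_get_score : Prop := ∀ (ball_path : List (Int × Int)) (teams : List (List (List Int))), Dom_step3_get_score ball_path teams → Spec_step3_get_score ball_path teams (step3_get_score ball_path teams)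

-- ===== LEMMAS AND PROOFS =====

-- setdefault changes the answer of get? only where the dict had no entry
theorem pv_sd_get? {κ ν : Type} [BEq κ] [LawfulBEq κ] (d : PySem.Dict κ ν) (k key : κ) (v : ν) :
    (d.setdefault k v).get? key = (d.get? key).or (if k == key then some v else none) := by
  by_cases hc : d.contains k
  · simp [PySem.Dict.setdefault, hc]
    by_cases hk : k = key
    · subst hk
      have := PySem.Dict.contains_eq_isSome_get? (d := d) (k := k)
      rw [hc] at this
      cases hg : d.get? k with
      | none => rw [hg] at this; simp at this
      | some w => simp
    · simp [hk]
  · simp [PySem.Dict.setdefault, hc, PySem.Dict.get?, List.find?_append, Option.map_or]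

-- a setdefault loop keeps, for every key, the value of its FIRST occurrence
theorem pv_foldl_sd_get? {κ ν α : Type} [BEq κ] [LawfulBEq κ]
    (ps : List α) (k : α → κ) (v : α → ν) (d : PySem.Dict κ ν) (key : κ) :
    (ps.foldl (fun d a => d.setdefault (k a) (v a)) d).get? key
      = (d.get? key).or ((ps.find? (fun a => k a == key)).map v) := by
  induction ps generalizing d with
  | nil => simp
  | cons a ps ih =>
    simp only [List.foldl_cons, List.find?_cons]
    rw [ih, pv_sd_get?, Option.or_assoc]
    by_cases hk : k a = key
    · simp [hk]
    · have : (k a == key) = false := by simp [hk]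
      simp [this]

-- first-match result of B's build loop, team by team, in scan order
def pvScanE (key : List Int) (tps : List (Int × List (List Int))) : Option (Int × Int) :=
  match tps with
  | [] => none
  | tp :: rest =>
    (((PySem.List.enumerate tp.2 0).find? (fun q => q.2 == key)).map
      (fun q => (tp.1, q.1))).or (pvScanE key rest)

theorem pv_build_get? (tps : List (Int × List (List Int))) (d : PySem.Dict (List Int) (Int × Int)) (key : List Int) :
    (tps.foldl (fun d tp => (PySem.List.enumerate tp.2 0).foldl
        (fun d q => d.setdefault q.2 (tp.1, q.1)) d) d).get? key
      = (d.get? key).or (pvScanE key tps) := by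
  induction tps generalizing d with
  | nil => simp [pvScanE]
  | cons tp rest ih =>
    simp only [List.foldl_cons, pvScanE]
    rw [ih, pv_foldl_sd_get? (PySem.List.enumerate tp.2 0) (·.2) (fun q => (tp.1, q.1)) d key,
      Option.or_assoc]

theorem pv_findIdx_enum (key : List Int) (team : List (List Int)) (i : Int) :
    ((PySem.List.enumerate team i).find? (fun q => q.2 == key)).map (·.1)
      = pvA_findIdx key team i := by
  induction team generalizing i with
  | nil => simp [PySem.List.enumerate, pvA_findIdx]
  | cons pos rest ih =>
    rw [PySem.List.enumerate_cons]
    simp only [List.find?_cons, pvA_findIdx]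
    by_cases hk : pos = key
    · simp [hk]
    · have : (pos == key) = false := by simp [hk]
      simp [this, hk, ih]

theorem pv_scanE_snd (key : List Int) (teams : List (List (List Int))) (n : Int) :
    (pvScanE key (PySem.List.enumerate teams n)).map (·.2) = pvA_scanTeams key teams := by
  induction teams generalizing n with
  | nil => simp [PySem.List.enumerate, pvScanE, pvA_scanTeams]
  | cons t rest ih =>
    rw [PySem.List.enumerate_cons]
    simp only [pvScanE, Option.map_or, Option.map_map, pvA_scanTeams]
    have h1 : (((PySem.List.enumerate t 0).find? (fun q => q.2 == key)).map
        ((·.2) ∘ (fun q => (n, q.1)))) = pvA_findIdx key t 0 := by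
      rw [← pv_findIdx_enum key t 0]; rfl
    rw [h1, ih]
    cases pvA_findIdx key t 0 <;> simp

-- the dict lookup computes exactly A's nested scan
theorem pv_main (key : List Int) (teams : List (List (List Int))) :
    ((pvB_build teams).get? key).map (·.2) = pvA_scanTeams key teams := by
  unfold pvB_build
  rw [pv_build_get?]
  simp only [PySem.Dict.get?_empty, Option.none_or]
  exact pv_scanE_snd key teams 0

theorem pv_eq (bp : List (Int × Int)) (teams : List (List (List Int))) :
    step3_get_score bp teams = pvB_loop (pvB_build teams) bp := by
  induction bp with
  | nil => simp [step3_get_score, pvB_loop]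
  | cons p rest ih =>
    have h := pv_main [p.1, p.2] teams
    cases hg : (pvB_build teams).get? [p.1, p.2] with
    | none =>
      rw [hg] at h; simp only [Option.map_none] at h
      simp [step3_get_score, pvB_loop, hg, ← h, ih]
    | some q =>
      rw [hg] at h; simp only [Option.map_some] at h
      simp [step3_get_score, pvB_loop, hg, ← h]

-- ===== VERDICT (by name: the statement is the Claim_ definition above) =====
theorem step3_get_score_spec : Claim_equal_step3_get_score := by
  intro bp teams _
  exact pv_eq bp teams
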